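-- pv_equiv track=rewrite | github.com/Darkaxt/lrcget-auto-translation | tools/autosync_eval/air_i_breathe_phase_pipeline.py | impossible_timestamp_clusters
-- ===== SOURCE A (Python) =====
-- def impossible_timestamp_clusters(starts_ms: list[int], threshold_ms: int = 100, min_size: int = 3) -> tuple[int, int | None]:
--     clusters = 0
--     first_cluster_ms: int | None = None
--     current: list[int] = []
--     for start in starts_ms:
--         if not current or start - current[-1] < threshold_ms:
--             current.append(start)
--             continue
--         if len(current) >= min_size:
--             clusters += 1
--             if first_cluster_ms is None:
--                 first_cluster_ms = current[0]
--         current = [start]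
--     if len(current) >= min_size:
--         clusters += 1
--         if first_cluster_ms is None:
--             first_cluster_ms = current[0]
--     return clusters, first_cluster_ms
-- ===== SOURCE B (Python) =====
-- def impossible_timestamp_clusters(starts_ms: list[int], threshold_ms: int = 100, min_size: int = 3) -> tuple[int, int | None]:
--     # Boundary-index formulation: compute the cluster-start indices from adjacent
--     # gaps, pair each with the next boundary (or n) to get cluster extents, and
--     # read the answer off the qualifying extents; no running cluster state.
--     n = len(starts_ms)
--     bounds = [i for i in range(n) if i == 0 or starts_ms[i] - starts_ms[i - 1] >= threshold_ms]
--     ends = bounds[1:] + ([n] if bounds else [])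
--     quals = [starts_ms[b] for b, e in zip(bounds, ends) if e - b >= min_size]
--     return len(quals), (quals[0] if quals else None)
-- ===== Notes on version B (the rewrite author's own statement) =====
-- stated objective: alternative
-- what changed: B replaces A's stateful loop (growing current-cluster list plus inline count/first bookkeeping) by a boundary-index computation: it derives the cluster-start indices from adjacent gaps, zips each boundary with the next one (or n) to get cluster extents, and reads the count and the first qualifying start off that extent list; no running cluster state exists.
-- outside the precondition, e.g. on impossible_timestamp_clusters([], 100, 0): A raises IndexError, B returns (0, None)
import Mathlib
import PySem

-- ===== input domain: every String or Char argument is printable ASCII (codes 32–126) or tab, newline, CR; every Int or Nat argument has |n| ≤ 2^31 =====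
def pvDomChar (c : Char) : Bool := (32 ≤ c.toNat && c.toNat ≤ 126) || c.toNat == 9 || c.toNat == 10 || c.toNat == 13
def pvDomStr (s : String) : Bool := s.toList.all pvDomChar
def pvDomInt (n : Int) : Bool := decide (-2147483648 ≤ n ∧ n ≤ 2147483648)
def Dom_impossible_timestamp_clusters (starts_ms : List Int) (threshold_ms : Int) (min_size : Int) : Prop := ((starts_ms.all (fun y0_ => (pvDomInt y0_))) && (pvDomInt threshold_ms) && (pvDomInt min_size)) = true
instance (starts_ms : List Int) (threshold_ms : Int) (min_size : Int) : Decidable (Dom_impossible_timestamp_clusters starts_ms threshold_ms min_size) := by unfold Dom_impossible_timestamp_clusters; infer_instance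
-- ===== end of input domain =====

-- B replaces A's stateful cluster loop by a boundary-index computation: cluster-start
-- indices from adjacent gaps, zipped with the next boundary (or n) into extents, from
-- which count and first qualifying start are read off (objective: alternative).


-- ===== PORT A =====
-- one iteration of A's loop; state = (clusters, first_cluster_ms, current)
def pvStepA (threshold_ms min_size : Int) (st : Int × Option Int × List Int) (start : Int) :
    Int × Option Int × List Int :=
  if st.2.2 = [] ∨ start - (PySem.List.pyGet? st.2.2 (-1)).getD 0 < threshold_ms then
    (st.1, st.2.1, st.2.2 ++ [start])
  else if min_size ≤ (st.2.2.length : Int) then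
    (st.1 + 1, (if st.2.1 = none then PySem.List.pyGet? st.2.2 0 else st.2.1), [start])
  else
    (st.1, st.2.1, [start])

-- A's trailing `if len(current) >= min_size` block after the loop
def pvFinishA (min_size : Int) (st : Int × Option Int × List Int) : Int × Option Int :=
  if min_size ≤ (st.2.2.length : Int) then
    (st.1 + 1, if st.2.1 = none then PySem.List.pyGet? st.2.2 0 else st.2.1)
  else
    (st.1, st.2.1)

def impossible_timestamp_clusters (starts_ms : List Int) (threshold_ms : Int) (min_size : Int) : Int × Option Int :=
  pvFinishA min_size (starts_ms.foldl (pvStepA threshold_ms min_size) (0, none, []))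

-- ===== PORT B =====
-- `i == 0 or starts_ms[i] - starts_ms[i - 1] >= threshold_ms` (indices from range(n), hence Nat)
def pvIsBound (xs : List Int) (threshold_ms : Int) (i : Nat) : Bool :=
  i == 0 || decide (threshold_ms ≤ xs.getD i 0 - xs.getD (i - 1) 0)

-- `bounds = [i for i in range(n) if ...]`
def pvBounds (xs : List Int) (threshold_ms : Int) : List Nat :=
  (List.range xs.length).filter (pvIsBound xs threshold_ms)

-- `[starts_ms[b] for b, e in ps if e - b >= min_size]`
def pvQualsOf (xs : List Int) (min_size : Int) (ps : List (Nat × Nat)) : List Int :=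
  (ps.filter (fun p => decide (min_size ≤ (p.2 : Int) - (p.1 : Int)))).map (fun p => xs.getD p.1 0)

def impossible_timestamp_clusters_alt (starts_ms : List Int) (threshold_ms : Int) (min_size : Int) : Int × Option Int :=
  let n := starts_ms.length
  let bounds := pvBounds starts_ms threshold_ms
  let ends := bounds.tail ++ (if bounds = [] then [] else [n])
  let quals := pvQualsOf starts_ms min_size (bounds.zip ends)
  ((quals.length : Int), quals.head?)

-- ===== PRECONDITION & SPEC =====
-- Pre_ excludes exactly the inputs where A raises IndexError: the empty list with
-- min_size <= 0 (the trailing `current[0]` then indexes the empty list).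
def Pre_impossible_timestamp_clusters (starts_ms : List Int) (threshold_ms : Int) (min_size : Int) : Prop :=
  starts_ms ≠ [] ∨ 1 ≤ min_size
instance (starts_ms : List Int) (threshold_ms : Int) (min_size : Int) : Decidable (Pre_impossible_timestamp_clusters starts_ms threshold_ms min_size) := by unfold Pre_impossible_timestamp_clusters; infer_instance
def pvWitness_impossible_timestamp_clusters : List Int × Int × Int := ([1, 2, 3, 200], 100, 3)

def Spec_impossible_timestamp_clusters (starts_ms : List Int) (threshold_ms : Int) (min_size : Int) (out : Int × Option Int) : Prop := out = impossible_timestamp_clusters_alt starts_ms threshold_ms min_size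
instance (starts_ms : List Int) (threshold_ms : Int) (min_size : Int) (out : Int × Option Int) : Decidable (Spec_impossible_timestamp_clusters starts_ms threshold_ms min_size out) := by unfold Spec_impossible_timestamp_clusters; infer_instance

-- ===== CLAIM (what is proved, stated in full; the proofs are below) =====
def Claim_equal_impossible_timestamp_clusters : Prop := ∀ (starts_ms : List Int) (threshold_ms : Int) (min_size : Int), Dom_impossible_timestamp_clusters starts_ms threshold_ms min_size → Pre_impossible_timestamp_clusters starts_ms threshold_ms min_size → Spec_impossible_timestamp_clusters starts_ms threshold_ms min_size (impossible_timestamp_clusters starts_ms threshold_ms min_size)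

-- ===== LEMMAS AND PROOFS =====

-- the closed clusters of B's computation: boundary zipped with the NEXT boundary
def pvCq (xs : List Int) (threshold_ms min_size : Int) : List Int :=
  pvQualsOf xs min_size ((pvBounds xs threshold_ms).zip (pvBounds xs threshold_ms).tail)

theorem pv_zip_tail_append (l : List Nat) (e b : Nat) (h : l.getLast? = some b) :
    l.zip (l.tail ++ [e]) = l.zip l.tail ++ [(b, e)] := by
  induction l with
  | nil => simp at h
  | cons x l ih =>
    cases l with
    | nil => simp_all
    | cons y ys =>
      have h' : (y :: ys).getLast? = some b := by simpa using h
      simpa using ih h'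

theorem pv_zip_snoc_tail (l : List Nat) (e b : Nat) (h : l.getLast? = some b) :
    (l ++ [e]).zip ((l ++ [e]).tail) = l.zip l.tail ++ [(b, e)] := by
  induction l with
  | nil => simp at h
  | cons x l ih =>
    cases l with
    | nil => simp_all
    | cons y ys =>
      have h' : (y :: ys).getLast? = some b := by simpa using h
      simpa using ih h'

theorem pv_mem_bounds_lt (xs : List Int) (θ : Int) (i : Nat) (h : i ∈ pvBounds xs θ) :
    i < xs.length := by
  simp [pvBounds, List.mem_filter] at h
  exact h.1

theorem pv_isBound_append (xs : List Int) (x θ : Int) (i : Nat) (h : i < xs.length) :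
    pvIsBound (xs ++ [x]) θ i = pvIsBound xs θ i := by
  unfold pvIsBound
  rcases Nat.eq_zero_or_pos i with h0 | h0
  · simp [h0]
  · have h1 : i - 1 < xs.length := by omega
    simp [List.getD_eq_getElem?_getD, List.getElem?_append_left h, List.getElem?_append_left h1]

theorem pv_bounds_append (xs : List Int) (x θ : Int) :
    pvBounds (xs ++ [x]) θ
      = pvBounds xs θ ++ (if pvIsBound (xs ++ [x]) θ xs.length then [xs.length] else []) := by
  unfold pvBounds
  have hlen : (xs ++ [x]).length = xs.length + 1 := by simp
  rw [hlen, List.range_succ, List.filter_append]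
  congr 1
  · exact List.filter_congr (fun i hi => by
      rw [pv_isBound_append xs x θ i (List.mem_range.mp hi)])
  · cases h : pvIsBound (xs ++ [x]) θ xs.length <;> simp [List.filter_cons, h]

theorem pv_qualsOf_append (xs : List Int) (m : Int) (ps qs : List (Nat × Nat)) :
    pvQualsOf xs m (ps ++ qs) = pvQualsOf xs m ps ++ pvQualsOf xs m qs := by
  simp [pvQualsOf]

theorem pv_qualsOf_stable (xs : List Int) (x m : Int) (ps : List (Nat × Nat))
    (h : ∀ p ∈ ps, p.1 < xs.length) :
    pvQualsOf (xs ++ [x]) m ps = pvQualsOf xs m ps := by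
  unfold pvQualsOf
  apply List.map_congr_left
  intro p hp
  have := h p (List.mem_of_mem_filter hp)
  rw [List.getD_append _ _ _ _ this]

theorem pv_getLast?_getD (xs : List Int) (h : xs ≠ []) :
    xs.getLast? = some (xs.getD (xs.length - 1) 0) := by
  have hlt : xs.length - 1 < xs.length := by
    cases xs with | nil => simp at h | cons a l => simp
  rw [List.getLast?_eq_getElem?, List.getD_eq_getElem _ _ hlt, List.getElem?_eq_getElem hlt]

-- the loop invariant: A's fold state, expressed through B's boundary list
def pvInvP (xs : List Int) (θ m : Int) : Prop :=
  (xs = [] ∧ xs.foldl (pvStepA θ m) (0, none, []) = (0, none, []))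
  ∨ ∃ b, (pvBounds xs θ).getLast? = some b ∧
      (((xs.foldl (pvStepA θ m) (0, none, [])).2.2.length : Int) = (xs.length : Int) - (b : Int)) ∧
      (xs.foldl (pvStepA θ m) (0, none, [])).2.2.head? = some (xs.getD b 0) ∧
      (xs.foldl (pvStepA θ m) (0, none, [])).2.2.getLast? = xs.getLast? ∧
      (xs.foldl (pvStepA θ m) (0, none, [])).1 = ((pvCq xs θ m).length : Int) ∧
      (xs.foldl (pvStepA θ m) (0, none, [])).2.1 = (pvCq xs θ m).head?

theorem pvInv_holds (θ m : Int) (xs : List Int) : pvInvP xs θ m := by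
  induction xs using List.reverseRecOn with
  | nil => exact Or.inl ⟨rfl, rfl⟩
  | append_singleton xs x ih =>
    rw [pvInvP, List.foldl_append]
    simp only [List.foldl_cons, List.foldl_nil]
    rcases ih with ⟨hnil, hst⟩ | ⟨b, hb, hlen, hhead, hlast, hcnt, hfst⟩
    · subst hnil
      right
      refine ⟨0, ?_, ?_, ?_, ?_, ?_, ?_⟩ <;>
        simp [pvStepA, pvBounds, pvIsBound, pvCq, pvQualsOf, List.range_succ]
    · -- shared facts about the pre-state
      set st := xs.foldl (pvStepA θ m) (0, none, []) with hstdef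
      have hb_mem : b ∈ pvBounds xs θ := List.mem_of_getLast? hb
      have hbn : b < xs.length := pv_mem_bounds_lt xs θ b hb_mem
      have hxs_ne : xs ≠ [] := by intro h; subst h; simp at hbn
      have hcur_ne : st.2.2 ≠ [] := by intro h; rw [h] at hhead; simp at hhead
      have hL : st.2.2.getLast? = some (xs.getD (xs.length - 1) 0) := by
        rw [hlast]; exact pv_getLast?_getD xs hxs_ne
      have hget1 : PySem.List.pyGet? st.2.2 (-1) = some (xs.getD (xs.length - 1) 0) := by
        rw [PySem.List.pyGet?_neg_one]; exact hL
      have hget0 : PySem.List.pyGet? st.2.2 0 = some (xs.getD b 0) := by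
        rw [PySem.List.pyGet?_zero, ← List.head?_eq_getElem?]; exact hhead
      have h1 : xs.length - 1 < xs.length := by omega
      have e1 : (xs ++ [x]).getD xs.length 0 = x := by
        simp [List.getD_eq_getElem?_getD, List.getElem?_append_right (le_refl xs.length)]
      have e2 : (xs ++ [x]).getD (xs.length - 1) 0 = xs.getD (xs.length - 1) 0 := by
        rw [List.getD_eq_getElem?_getD, List.getD_eq_getElem?_getD,
          List.getElem?_append_left h1]
      have h0 : (xs.length == 0) = false := by
        simpa using (by omega : ¬ xs.length = 0)
      have hnb : pvIsBound (xs ++ [x]) θ xs.length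
          = decide (θ ≤ x - xs.getD (xs.length - 1) 0) := by
        unfold pvIsBound
        rw [e1, e2, h0]
        simp
      have hzmem : ∀ p ∈ (pvBounds xs θ).zip (pvBounds xs θ).tail, p.1 < xs.length := by
        intro p hp
        exact pv_mem_bounds_lt xs θ p.1 ((List.of_mem_zip hp).1)
      by_cases hgap : x - xs.getD (xs.length - 1) 0 < θ
      · -- gap < threshold: x extends the current cluster; bounds unchanged
        have hbnds : pvBounds (xs ++ [x]) θ = pvBounds xs θ := by
          rw [pv_bounds_append, hnb, decide_eq_false (by omega : ¬ θ ≤ x - xs.getD (xs.length - 1) 0)]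
          simp
        have hcq : pvCq (xs ++ [x]) θ m = pvCq xs θ m := by
          unfold pvCq
          rw [hbnds, pv_qualsOf_stable _ _ _ _ hzmem]
        have hstep : pvStepA θ m st x = (st.1, st.2.1, st.2.2 ++ [x]) := by
          unfold pvStepA
          simp only [hget1, Option.getD_some]
          rw [if_pos (Or.inr hgap)]
        right
        refine ⟨b, ?_, ?_, ?_, ?_, ?_, ?_⟩
        · rw [hbnds]; exact hb
        · rw [hstep]; simp; push_cast; omega
        · rw [hstep]
          simp only [List.head?_append_of_ne_nil _ hcur_ne, hhead,
            List.getD_eq_getElem?_getD, List.getElem?_append_left hbn]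
        · rw [hstep]; simp
        · rw [hstep, hcq]; exact hcnt
        · rw [hstep, hcq]; exact hfst
      · -- gap >= threshold: the current cluster closes, x starts a new one
        have hbnds : pvBounds (xs ++ [x]) θ = pvBounds xs θ ++ [xs.length] := by
          rw [pv_bounds_append, hnb, decide_eq_true (by omega : θ ≤ x - xs.getD (xs.length - 1) 0)]
          simp
        have hcq : pvCq (xs ++ [x]) θ m
            = pvCq xs θ m ++ (if m ≤ (xs.length : Int) - (b : Int) then [xs.getD b 0] else []) := by
          unfold pvCq
          rw [hbnds, pv_zip_snoc_tail _ _ _ hb, pv_qualsOf_append,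
            pv_qualsOf_stable _ _ _ _ hzmem]
          congr 1
          by_cases hq : m ≤ (xs.length : Int) - (b : Int) <;>
            simp [pvQualsOf, hq, List.getD_eq_getElem?_getD, List.getElem?_append_left hbn]
        have hsz : (m ≤ (st.2.2.length : Int)) ↔ (m ≤ (xs.length : Int) - (b : Int)) := by
          omega
        have hcond : ¬ (st.2.2 = [] ∨ x - (PySem.List.pyGet? st.2.2 (-1)).getD 0 < θ) := by
          rw [hget1]
          simp only [Option.getD_some]
          exact not_or.mpr ⟨hcur_ne, hgap⟩
        have hglast : ((xs ++ [x]).getD b 0) = xs.getD b 0 := by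
          simp [List.getD_eq_getElem?_getD, List.getElem?_append_left hbn]
        right
        by_cases hq : m ≤ (st.2.2.length : Int)
        · have hstep : pvStepA θ m st x
              = (st.1 + 1, (if st.2.1 = none then PySem.List.pyGet? st.2.2 0 else st.2.1), [x]) := by
            unfold pvStepA
            simp [hcond, hq]
          refine ⟨xs.length, ?_, ?_, ?_, ?_, ?_, ?_⟩
          · rw [hbnds]; simp
          · rw [hstep]; simp
          · rw [hstep]
            simp [List.getD_eq_getElem?_getD,
              List.getElem?_append_right (le_refl xs.length)]
          · rw [hstep]; simp
          · rw [hstep, hcq, if_pos (hsz.mp hq)]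
            simp [hcnt]
          · rw [hstep, hcq, if_pos (hsz.mp hq)]
            rcases hh : (pvCq xs θ m).head? with _ | v
            · have hni : pvCq xs θ m = [] := List.head?_eq_none_iff.mp hh
              simp [hfst, hget0, hni]
            · have hnn : pvCq xs θ m ≠ [] := by intro h; simp [h] at hh
              simp [hfst, hh, List.head?_append_of_ne_nil _ hnn]
        · have hstep : pvStepA θ m st x = (st.1, st.2.1, [x]) := by
            unfold pvStepA
            simp [hcond, hq]
          refine ⟨xs.length, ?_, ?_, ?_, ?_, ?_, ?_⟩
          · rw [hbnds]; simp
          · rw [hstep]; simp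
          · rw [hstep]
            simp [List.getD_eq_getElem?_getD,
              List.getElem?_append_right (le_refl xs.length)]
          · rw [hstep]; simp
          · rw [hstep, hcq]
            simp [hcnt, if_neg (fun hbq => hq (hsz.mpr hbq))]
          · rw [hstep, hcq]
            simp [hfst, if_neg (fun hbq => hq (hsz.mpr hbq))]

-- ===== VERDICT (by name: the statement is the Claim_ definition above) =====
theorem impossible_timestamp_clusters_spec : Claim_equal_impossible_timestamp_clusters := by
  intro xs θ m _ hpre
  unfold Spec_impossible_timestamp_clusters impossible_timestamp_clusters impossible_timestamp_clusters_alt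
  rcases pvInv_holds θ m xs with ⟨hnil, hst⟩ | ⟨b, hb, hlen, hhead, hlast, hcnt, hfst⟩
  · subst hnil
    have hm : 1 ≤ m := by
      rcases hpre with h | h
      · exact absurd rfl h
      · exact h
    rw [hst]
    simp [pvFinishA, pvBounds, pvQualsOf]
    omega
  · have hbne : pvBounds xs θ ≠ [] := by intro h; rw [h] at hb; simp at hb
    have hget0 : PySem.List.pyGet? (xs.foldl (pvStepA θ m) (0, none, [])).2.2 0
        = some (xs.getD b 0) := by
      rw [PySem.List.pyGet?_zero, ← List.head?_eq_getElem?]; exact hhead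
    have hquals : pvQualsOf xs m ((pvBounds xs θ).zip ((pvBounds xs θ).tail ++ [xs.length]))
        = pvCq xs θ m ++ (if m ≤ (xs.length : Int) - (b : Int) then [xs.getD b 0] else []) := by
      rw [pv_zip_tail_append _ _ _ hb]
      unfold pvCq
      rw [pv_qualsOf_append]
      congr 1
      by_cases hq : m ≤ (xs.length : Int) - (b : Int) <;> simp [pvQualsOf, hq]
    by_cases hq : m ≤ (((xs.foldl (pvStepA θ m) (0, none, [])).2.2.length : Int))
    · have hq' : m ≤ (xs.length : Int) - (b : Int) := by omega
      simp only [pvFinishA, if_pos hq, if_neg hbne]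
      rw [hquals, if_pos hq']
      rw [Prod.mk.injEq]
      refine ⟨by simp [hcnt], ?_⟩
      rcases hh : (pvCq xs θ m).head? with _ | v
      · have hni : pvCq xs θ m = [] := List.head?_eq_none_iff.mp hh
        simp [hfst, hget0, hni]
      · have hnn : pvCq xs θ m ≠ [] := by intro h; simp [h] at hh
        simp [hfst, hh, List.head?_append_of_ne_nil _ hnn]
    · have hq' : ¬ m ≤ (xs.length : Int) - (b : Int) := by omega
      simp only [pvFinishA, if_neg hq, if_neg hbne]
      rw [hquals, if_neg hq']
      simp [hcnt, hfst]
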